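-- pv_equiv track=rewrite | github.com/AbdeI1/Archive | AdventOfCode/AdventOfCode/2020/Day 11/Day11Code.py | seesRight
-- ===== SOURCE A (Python) =====
-- def seesRight(i, j, f):
-- 	jnew = j + 1
-- 	while jnew < len(f[i]):
-- 		if f[i][jnew] == "#":
-- 			return True
-- 		if f[i][jnew] == "L":
-- 			return False
-- 		jnew += 1
-- 	return False
-- ===== SOURCE B (Python) =====
-- def seesRight(i, j, f):
--     rest = f[i][j+1:]
--     h = rest.find("#")
--     l = rest.find("L")
--     return h != -1 and (l == -1 or h < l)
-- ===== Notes on version B (the rewrite author's own statement) =====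
-- stated objective: simpler
-- what changed: Replaces the fused early-exit character-stepping loop by slicing the rest of the row and comparing the positions of the first '#' and first 'L' found by two independent searches.
-- outside the precondition, e.g. on seesRight(2, 0, ['L']): A raises IndexError, B raises IndexError; on seesRight(0, -3, ['#..']): A returns True, B returns False
import Mathlib
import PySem

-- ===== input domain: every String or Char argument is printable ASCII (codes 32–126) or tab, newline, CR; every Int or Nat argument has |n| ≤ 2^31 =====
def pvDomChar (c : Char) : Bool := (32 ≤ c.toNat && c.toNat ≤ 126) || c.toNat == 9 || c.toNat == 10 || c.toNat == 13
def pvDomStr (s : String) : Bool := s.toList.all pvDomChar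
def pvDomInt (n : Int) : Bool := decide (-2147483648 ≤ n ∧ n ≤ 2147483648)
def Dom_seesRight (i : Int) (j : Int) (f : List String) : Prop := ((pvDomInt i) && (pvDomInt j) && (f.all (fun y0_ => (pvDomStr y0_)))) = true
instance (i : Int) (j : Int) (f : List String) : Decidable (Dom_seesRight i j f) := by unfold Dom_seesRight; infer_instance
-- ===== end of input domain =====

-- B replaces A's fused early-exit index-stepping loop by slicing the rest of the row and
-- comparing the positions of two independent searches (first '#', first 'L'): simpler, same cost.

-- ===== PORT A =====
-- the while loop of A; index kept as Nat, exact for the nonnegative start index Pre_ guarantees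
def seesRightLoop (cs : List Char) (jnew : Nat) : Bool :=
  if h : jnew < cs.length then
    if cs[jnew] = '#' then true
    else if cs[jnew] = 'L' then false
    else seesRightLoop cs (jnew + 1)
  else false
termination_by cs.length - jnew

def seesRight (i : Int) (j : Int) (f : List String) : Bool :=
  match PySem.List.pyGet? f i with
  | some s => seesRightLoop s.toList (j + 1).toNat   -- (j+1).toNat = j+1 under Pre_ (j ≥ -1)
  | none => false                                     -- unreachable under Pre_: Python raises IndexError

-- ===== PORT B =====
def seesRight_alt (i : Int) (j : Int) (f : List String) : Bool :=
  match PySem.List.pyGet? f i with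
  | some s =>
      let rest := PySem.Str.slice s (some (j + 1)) none
      let h := PySem.Str.find rest "#"
      let l := PySem.Str.find rest "L"
      decide (h ≠ -1) && (decide (l = -1) || decide (h < l))
  | none => false                                     -- unreachable under Pre_: Python raises IndexError

-- ===== PRECONDITION & SPEC =====
-- Pre_ restricts to the function's natural domain: i inside Python's index range (outside it A
-- raises IndexError) and column index j ≥ -1; for j ≤ -2 A's negative start index wraps and
-- rescans the head of the row, a corner no caller of this grid routine reaches.
def Pre_seesRight (i : Int) (j : Int) (f : List String) : Prop :=
  PySem.Raise.InRange f.length i ∧ -1 ≤ j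
instance (i : Int) (j : Int) (f : List String) : Decidable (Pre_seesRight i j f) := by
  unfold Pre_seesRight; infer_instance

def pvWitness_seesRight : Int × Int × List String := (0, 0, ["L.#"])

def Spec_seesRight (i : Int) (j : Int) (f : List String) (out : Bool) : Prop := out = seesRight_alt i j f
instance (i : Int) (j : Int) (f : List String) (out : Bool) : Decidable (Spec_seesRight i j f out) := by
  unfold Spec_seesRight; infer_instance

-- ===== CLAIM (what is proved, stated in full; the proofs are below) =====
def Claim_equal_seesRight : Prop := ∀ (i : Int) (j : Int) (f : List String),
  Dom_seesRight i j f → Pre_seesRight i j f → Spec_seesRight i j f (seesRight i j f)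

-- ===== LEMMAS AND PROOFS =====

-- abstract first-seat scan over the remaining row
def firstSeat : List Char → Bool
  | [] => false
  | c :: t => if c = '#' then true else if c = 'L' then false else firstSeat t

theorem seesRightLoop_eq_firstSeat (cs : List Char) (n : Nat) :
    seesRightLoop cs n = firstSeat (cs.drop n) := by
  fun_induction seesRightLoop cs n with
  | case1 n h h2 =>
    rw [List.drop_eq_getElem_cons h]
    simp [firstSeat, h2]
  | case2 n h h2 h3 =>
    rw [List.drop_eq_getElem_cons h]
    simp [firstSeat, h3]
  | case3 n h h2 h3 ih =>
    rw [List.drop_eq_getElem_cons h]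
    simp [firstSeat, h2, h3, ih]
  | case4 n h =>
    rw [List.drop_of_length_le (by omega)]
    simp [firstSeat]

-- uniqueness: find returns exactly the first matching position
theorem find_eq_of_first (s sub : List Char) (k : Nat)
    (hp : sub <+: s.drop k) (hmin : ∀ i, i < k → ¬ sub <+: s.drop i) :
    PySem.Chars.find s sub = (k : Int) := by
  have hinf : sub <:+: s := hp.isInfix.trans (List.drop_suffix k s).isInfix
  have h0 : 0 ≤ PySem.Chars.find s sub := (PySem.Chars.find_nonneg_iff s sub).2 hinf
  obtain ⟨hpf, hmn⟩ := PySem.Chars.find_spec (s := s) (sub := sub) h0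
  have hk : (PySem.Chars.find s sub).toNat = k := by
    rcases Nat.lt_trichotomy (PySem.Chars.find s sub).toNat k with h | h | h
    · exact absurd hpf (hmin _ h)
    · exact h
    · exact absurd hp (hmn _ h)
  omega

theorem find_singleton_cons (c x : Char) (t : List Char) :
    PySem.Chars.find (x :: t) [c] =
      if x = c then 0
      else if PySem.Chars.find t [c] = -1 then -1 else PySem.Chars.find t [c] + 1 := by
  by_cases hxc : x = c
  · simp only [hxc]
    exact find_eq_of_first (c :: t) [c] 0 (by simp) (by omega)
  · rw [if_neg hxc]
    by_cases hft : PySem.Chars.find t [c] = -1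
    · rw [if_pos hft]
      have hni : ¬ [c] <:+: t := (PySem.Chars.find_eq_neg_one_iff t [c]).1 hft
      refine (PySem.Chars.find_eq_neg_one_iff _ _).2 ?_
      intro h
      rcases List.mem_cons.1 ((List.singleton_infix_iff c (x :: t)).1 h) with h' | h'
      · exact hxc h'.symm
      · exact hni ((List.singleton_infix_iff c t).2 h')
    · rw [if_neg hft]
      have h0 : 0 ≤ PySem.Chars.find t [c] := by
        have := PySem.Chars.neg_one_le_find t [c]; omega
      obtain ⟨hpf, hmn⟩ := PySem.Chars.find_spec (s := t) (sub := [c]) h0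
      have := find_eq_of_first (x :: t) [c] ((PySem.Chars.find t [c]).toNat + 1)
        (by simpa using hpf)
        (by
          intro i hi
          match i with
          | 0 => simp [Ne.symm hxc]
          | i + 1 => simpa using hmn i (by omega))
      omega

theorem firstSeat_eq_find (r : List Char) :
    firstSeat r =
      (decide (PySem.Chars.find r ['#'] ≠ -1) &&
        (decide (PySem.Chars.find r ['L'] = -1) ||
          decide (PySem.Chars.find r ['#'] < PySem.Chars.find r ['L']))) := by
  induction r with
  | nil => decide
  | cons c t ih =>
    have hH := PySem.Chars.neg_one_le_find t ['#']
    have hL := PySem.Chars.neg_one_le_find t ['L']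
    simp only [firstSeat, find_singleton_cons, ih]
    by_cases h1 : c = '#'
    · simp only [h1, if_neg (by decide : ¬ ('#' : Char) = 'L')]
      rcases eq_or_ne (PySem.Chars.find t ['L']) (-1) with h | h <;> simp_all <;> omega
    · by_cases h2 : c = 'L'
      · simp only [h2, if_neg (by decide : ¬ ('L' : Char) = '#')]
        rcases eq_or_ne (PySem.Chars.find t ['#']) (-1) with h | h <;> simp_all <;> omega
      · simp only [if_neg h1, if_neg h2]
        rcases eq_or_ne (PySem.Chars.find t ['#']) (-1) with h3 | h3 <;>
          rcases eq_or_ne (PySem.Chars.find t ['L']) (-1) with h4 | h4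
        · simp [h3, h4]
        · simp [h3, h4]
        · simp [h3, h4, show PySem.Chars.find t ['#'] + 1 ≠ -1 by omega]
        · simp [h3, h4, show PySem.Chars.find t ['#'] + 1 ≠ -1 by omega,
            show PySem.Chars.find t ['L'] + 1 ≠ -1 by omega]

-- ===== VERDICT (by name: the statement is the Claim_ definition above) =====
theorem seesRight_spec : Claim_equal_seesRight := by
  intro i j f _ hpre
  obtain ⟨hin, hj⟩ := hpre
  unfold Spec_seesRight seesRight seesRight_alt
  cases hs : PySem.List.pyGet? f i with
  | none => exact absurd hin ((PySem.List.pyGet?_eq_none_iff f i).1 hs)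
  | some s =>
    have hn : j + 1 = ((j + 1).toNat : Int) := by omega
    dsimp only
    rw [seesRightLoop_eq_firstSeat, firstSeat_eq_find]
    have hrest : (PySem.Str.slice s (some (j + 1)) none).toList = s.toList.drop (j + 1).toNat := by
      rw [PySem.Str.toList_slice, PySem.Chars.slice_eq_listSlice,
        show (some (j + 1) : Option Int) = some (((j + 1).toNat : Nat) : Int) by rw [← hn]]
      exact PySem.List.slice_from_natCast _ _
    simp only [PySem.Str.find_eq, hrest]
    rfl
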